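-- pv_equiv track=rewrite | github.com/coralen/sentiment-order-study | src/stats.py | calculate_length_buckets
-- ===== SOURCE A (Python) =====
-- from collections import Counter
--
-- def calculate_length_buckets(data, bucket_size=100, max_bucket=1000):
--     token_lengths = [len(tokens) for tokens in data['tokens']]
--     buckets = [min((length // bucket_size) * bucket_size, max_bucket)
--                for length in token_lengths]
--     bucket_counts = Counter(buckets)
--     sorted_buckets = sorted(bucket_counts.items())
--
--     bucket_labels = [f"{b}-{b + bucket_size - 1}" if b < max_bucket
--                     else f"{max_bucket}+" for b, _ in sorted_buckets]
--     bucket_values = [count for _, count in sorted_buckets]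
--
--     return {label: value for label, value in zip(bucket_labels, bucket_values)}
-- ===== SOURCE B (Python) =====
-- def calculate_length_buckets(data, bucket_size=100, max_bucket=1000):
--     # sort-then-scan: sort the bucket keys once and count runs of equal keys
--     # in a single pass, instead of hashing into a Counter and sorting its items.
--     keys = sorted(min((len(tokens) // bucket_size) * bucket_size, max_bucket)
--                   for tokens in data['tokens'])
--     result = {}
--     i, n = 0, len(keys)
--     while i < n:
--         b = keys[i]
--         j = i + 1
--         while j < n and keys[j] == b:
--             j += 1
--         if b < max_bucket:
--             result[f"{b}-{b + bucket_size - 1}"] = j - i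
--         else:
--             result[f"{max_bucket}+"] = j - i
--         i = j
--     return result
-- ===== Notes on version B (the rewrite author's own statement) =====
-- stated objective: alternative
-- what changed: Replaces Counter-hashing plus sorting the counter's items with sorting the list of bucket keys once and counting runs of equal keys in a single linear scan that builds the result dict directly (no Counter, no label/value intermediate lists, no zip).
import Mathlib
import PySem

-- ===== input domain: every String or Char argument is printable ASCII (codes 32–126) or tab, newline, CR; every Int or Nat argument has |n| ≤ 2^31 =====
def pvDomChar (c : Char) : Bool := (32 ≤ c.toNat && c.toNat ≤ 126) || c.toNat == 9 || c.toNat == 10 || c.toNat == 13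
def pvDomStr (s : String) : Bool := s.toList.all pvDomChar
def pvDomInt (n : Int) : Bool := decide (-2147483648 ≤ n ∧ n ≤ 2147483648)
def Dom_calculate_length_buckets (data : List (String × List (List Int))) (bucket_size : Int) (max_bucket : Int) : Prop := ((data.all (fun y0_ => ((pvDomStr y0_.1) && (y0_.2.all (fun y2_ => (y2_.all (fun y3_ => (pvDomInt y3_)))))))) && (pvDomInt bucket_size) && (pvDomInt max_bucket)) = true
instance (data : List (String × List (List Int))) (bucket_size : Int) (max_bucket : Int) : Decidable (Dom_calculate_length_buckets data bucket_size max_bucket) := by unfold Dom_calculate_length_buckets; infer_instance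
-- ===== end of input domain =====

-- B replaces Counter-hashing + sorting the counter's items by sorting the bucket keys once
-- and counting runs of equal keys in one linear scan (alternative algorithm, similar cost).

-- ===== PORT A =====
def calculate_length_buckets (data : List (String × List (List Int))) (bucket_size : Int) (max_bucket : Int) : List (String × Int) :=
  let token_lengths : List Int :=
    ((PySem.Dict.get? (PySem.Dict.mk data) "tokens").getD []).map (fun (tokens : List Int) => (tokens.length : Int))
  let buckets : List Int :=
    token_lengths.map (fun length => min (PySem.Int.floordiv length bucket_size * bucket_size) max_bucket)
  let bucket_counts : PySem.Dict Int Int := PySem.Dict.counter buckets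
  let sorted_buckets : List (Int × Int) :=
    PySem.List.sorted2 bucket_counts.items (fun p => p.1) (fun p => p.2)
  let bucket_labels : List String :=
    sorted_buckets.map (fun p =>
      if p.1 < max_bucket then PySem.Int.toStr p.1 ++ "-" ++ PySem.Int.toStr (p.1 + bucket_size - 1)
      else PySem.Int.toStr max_bucket ++ "+")
  let bucket_values : List Int := sorted_buckets.map (fun p => p.2)
  ((bucket_labels.zip bucket_values).foldl (fun d lv => PySem.Dict.insert d lv.1 lv.2) (PySem.Dict.empty : PySem.Dict String Int)).items

-- ===== PORT B =====
-- the outer while loop of Source B: consume one run of equal keys at a time, emit (key, run length)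
def pvRuns : List Int → List (Int × Int)
  | [] => []
  | b :: t =>
      (b, 1 + ((t.takeWhile (fun x => x == b)).length : Int)) :: pvRuns (t.dropWhile (fun x => x == b))
termination_by l => l.length
decreasing_by simpa using Nat.lt_succ_of_le (List.length_dropWhile_le _ t)

def calculate_length_buckets_alt (data : List (String × List (List Int))) (bucket_size : Int) (max_bucket : Int) : List (String × Int) :=
  let keys : List Int :=
    PySem.List.sorted
      (((PySem.Dict.get? (PySem.Dict.mk data) "tokens").getD []).map
        (fun (tokens : List Int) => min (PySem.Int.floordiv (tokens.length : Int) bucket_size * bucket_size) max_bucket))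
      (fun x => x)
  ((pvRuns keys).foldl
    (fun d p =>
      PySem.Dict.insert d
        (if p.1 < max_bucket then PySem.Int.toStr p.1 ++ "-" ++ PySem.Int.toStr (p.1 + bucket_size - 1)
         else PySem.Int.toStr max_bucket ++ "+")
        p.2)
    (PySem.Dict.empty : PySem.Dict String Int)).items

-- ===== PRECONDITION & SPEC =====
-- Pre_ excludes exactly the inputs where the Python A raises: a missing 'tokens' key (KeyError)
-- and bucket_size = 0 (ZeroDivisionError).
def Pre_calculate_length_buckets (data : List (String × List (List Int))) (bucket_size : Int) (max_bucket : Int) : Prop :=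
  PySem.Dict.contains (PySem.Dict.mk data) "tokens" = true ∧ bucket_size ≠ 0
instance (data : List (String × List (List Int))) (bucket_size : Int) (max_bucket : Int) : Decidable (Pre_calculate_length_buckets data bucket_size max_bucket) := by unfold Pre_calculate_length_buckets; infer_instance

def pvWitness_calculate_length_buckets : (List (String × List (List Int))) × Int × Int :=
  ([("tokens", [[1, 2], [], [3]])], 2, 4)

def Spec_calculate_length_buckets (data : List (String × List (List Int))) (bucket_size : Int) (max_bucket : Int) (out : List (String × Int)) : Prop := out = calculate_length_buckets_alt data bucket_size max_bucket
instance (data : List (String × List (List Int))) (bucket_size : Int) (max_bucket : Int) (out : List (String × Int)) : Decidable (Spec_calculate_length_buckets data bucket_size max_bucket out) := by unfold Spec_calculate_length_buckets; infer_instance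

-- ===== CLAIM (what is proved, stated in full; the proofs are below) =====
def Claim_equal_calculate_length_buckets : Prop := ∀ (data : List (String × List (List Int))) (bucket_size : Int) (max_bucket : Int), Dom_calculate_length_buckets data bucket_size max_bucket → Pre_calculate_length_buckets data bucket_size max_bucket → Spec_calculate_length_buckets data bucket_size max_bucket (calculate_length_buckets data bucket_size max_bucket)

-- ===== LEMMAS AND PROOFS =====

-- insertBy only consults `before` on the inserted element vs members of the list
theorem pv_insertBy_congr {α : Type} (f g : α → α → Bool) (x : α) (ys : List α)
    (h : ∀ b ∈ ys, f x b = g x b) :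
    PySem.List.insertBy f x ys = PySem.List.insertBy g x ys := by
  induction ys with
  | nil => rfl
  | cons y t ih =>
      simp only [PySem.List.insertBy]
      rw [h y (by simp)]
      by_cases hg : g x y = true
      · simp [hg]
      · simp only [Bool.not_eq_true] at hg
        simp [hg, ih (fun b hb => h b (by simp [hb]))]

theorem pv_foldl_insertBy_congr {α : Type} (f g : α → α → Bool) :
    ∀ (xs acc : List α), (∀ a b, (a ∈ xs ∨ a ∈ acc) → (b ∈ xs ∨ b ∈ acc) → f a b = g a b) →
    xs.foldl (fun acc x => PySem.List.insertBy f x acc) acc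
      = xs.foldl (fun acc x => PySem.List.insertBy g x acc) acc := by
  intro xs
  induction xs with
  | nil => intro acc _; rfl
  | cons x t ih =>
      intro acc h
      simp only [List.foldl_cons]
      have hins : PySem.List.insertBy f x acc = PySem.List.insertBy g x acc :=
        pv_insertBy_congr f g x acc (fun b hb => h x b (Or.inl (by simp)) (Or.inr hb))
      rw [hins]
      apply ih
      intro a b ha hb
      apply h a b
      · rcases ha with ha | ha
        · exact Or.inl (by simp [ha])
        · rcases (PySem.List.mem_insertBy g x a acc).1 ha with h' | h'
          · exact Or.inl (by simp [h'])
          · exact Or.inr h'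
      · rcases hb with hb | hb
        · exact Or.inl (by simp [hb])
        · rcases (PySem.List.mem_insertBy g x b acc).1 hb with h' | h'
          · exact Or.inl (by simp [h'])
          · exact Or.inr h'

-- on a list of pairs with pairwise-distinct first components, sorting by the tuple key
-- (fst, snd) coincides with sorting by fst alone
theorem pv_sorted2_eq_sorted_fst (xs : List (Int × Int))
    (hinj : ∀ a ∈ xs, ∀ b ∈ xs, a.1 = b.1 → a = b) :
    PySem.List.sorted2 xs (fun p => p.1) (fun p => p.2)
      = PySem.List.sorted xs (fun p => p.1) := by
  simp only [PySem.List.sorted2, PySem.List.sorted]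
  apply pv_foldl_insertBy_congr
  intro a b ha hb
  simp only [List.not_mem_nil, or_false] at ha hb
  by_cases hab : a.1 = b.1
  · have : a = b := hinj a ha b hb hab
    subst this
    simp
  · rcases lt_or_gt_of_ne hab with h | h
    · simp [h, not_lt.2 (le_of_lt h)]
    · simp [not_lt.2 (le_of_lt h), h]

theorem pv_mem_fst_of_mem_runs (l : List Int) (p : Int × Int) (hp : p ∈ pvRuns l) : p.1 ∈ l := by
  induction l using pvRuns.induct with
  | case1 => simp [pvRuns] at hp
  | case2 b t ih =>
      rw [pvRuns] at hp
      rcases List.mem_cons.1 hp with h | h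
      · subst h; simp
      · have := ih h
        exact List.mem_cons_of_mem _ ((List.dropWhile_sublist _).mem this)

theorem pv_mem_runs_fst_of_mem (l : List Int) (x : Int) (hx : x ∈ l) :
    x ∈ (pvRuns l).map Prod.fst := by
  induction l using pvRuns.induct with
  | case1 => simp at hx
  | case2 b t ih =>
      rw [pvRuns]
      rcases List.mem_cons.1 hx with h | h
      · subst h; simp
      · by_cases hb : x = b
        · subst hb; simp
        · have hx' : x ∈ t.dropWhile (fun y => y == b) := by
            have := (List.takeWhile_append_dropWhile (p := fun y => y == b) (l := t)) ▸ h
            rcases List.mem_append.1 this with h' | h'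
            · exact absurd (by simpa using List.mem_takeWhile_imp h') hb
            · exact h'
          simp only [List.map_cons]
          exact List.mem_cons_of_mem _ (ih hx')

-- structure of a sorted cons: elements of the dropWhile part are strictly greater than the head
theorem pv_sorted_cons_facts (b : Int) (t : List Int)
    (hs : (b :: t).Pairwise (· ≤ ·)) :
    (t.dropWhile (fun x => x == b)).Pairwise (· ≤ ·) ∧
      (∀ x ∈ t.dropWhile (fun x => x == b), b < x) := by
  have ht : t.Pairwise (· ≤ ·) := (List.pairwise_cons.1 hs).2
  have hble : ∀ x ∈ t, b ≤ x := (List.pairwise_cons.1 hs).1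
  have hdw : (t.dropWhile (fun x => x == b)).Pairwise (· ≤ ·) :=
    List.Pairwise.sublist (List.dropWhile_sublist _) ht
  refine ⟨hdw, ?_⟩
  intro x hx
  rcases hdwe : t.dropWhile (fun x => x == b) with - | ⟨c, r⟩
  · simp [hdwe] at hx
  · have hcne : (c == b) = false := by
      have := List.head_dropWhile_not (fun x => x == b) (l := t) (by simp [hdwe])
      simpa [hdwe] using this
    have hcmem : c ∈ t := (List.dropWhile_sublist _).mem (by rw [hdwe]; exact List.mem_cons_self)
    have hbc : b < c := lt_of_le_of_ne (hble c hcmem) (fun e => (by simpa using hcne : ¬ c = b) e.symm)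
    rw [hdwe] at hx
    rcases List.mem_cons.1 hx with h | h
    · subst h; exact hbc
    · have : c ≤ x := (List.pairwise_cons.1 (hdwe ▸ hdw)).1 x h
      exact lt_of_lt_of_le hbc this

theorem pv_runs_pairwise (l : List Int) (hs : l.Pairwise (· ≤ ·)) :
    (pvRuns l).Pairwise (fun a b => a.1 < b.1) := by
  induction l using pvRuns.induct with
  | case1 => simp [pvRuns]
  | case2 b t ih =>
      obtain ⟨hdw, hgt⟩ := pv_sorted_cons_facts b t hs
      rw [pvRuns]
      refine List.pairwise_cons.2 ⟨?_, ih hdw⟩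
      intro p hp
      exact hgt p.1 (pv_mem_fst_of_mem_runs _ p hp)

theorem pv_runs_count (l : List Int) (hs : l.Pairwise (· ≤ ·)) :
    ∀ p ∈ pvRuns l, p.2 = (l.count p.1 : Int) := by
  induction l using pvRuns.induct with
  | case1 => simp [pvRuns]
  | case2 b t ih =>
      obtain ⟨hdw, hgt⟩ := pv_sorted_cons_facts b t hs
      intro p hp
      rw [pvRuns] at hp
      have hsplit : t = t.takeWhile (fun x => x == b) ++ t.dropWhile (fun x => x == b) :=
        (List.takeWhile_append_dropWhile ..).symm
      rcases List.mem_cons.1 hp with h | h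
      · subst h
        dsimp only
        have htw : (t.takeWhile (fun x => x == b)).count b = (t.takeWhile (fun x => x == b)).length :=
          List.count_eq_length.2 (fun y hy => by
            have h2 := List.mem_takeWhile_imp hy
            exact (beq_iff_eq.1 (by simpa using h2)).symm)
        have hdwz : (t.dropWhile (fun x => x == b)).count b = 0 :=
          List.count_eq_zero.2 (fun hmem => lt_irrefl b (hgt b hmem))
        rw [List.count_cons_self]
        conv_rhs => rw [hsplit]
        rw [List.count_append, htw, hdwz]
        push_cast
        ring
      · have hpd : p.1 ∈ t.dropWhile (fun x => x == b) := pv_mem_fst_of_mem_runs _ p h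
        have hne : p.1 ≠ b := fun e => lt_irrefl b (e ▸ hgt p.1 hpd)
        have htwz : (t.takeWhile (fun x => x == b)).count p.1 = 0 :=
          List.count_eq_zero.2 (fun hmem => hne (by simpa using List.mem_takeWhile_imp hmem))
        have : (b :: t).count p.1 = (t.dropWhile (fun x => x == b)).count p.1 := by
          rw [List.count_cons_of_ne (Ne.symm hne)]
          conv_lhs => rw [hsplit]
          rw [List.count_append, htwz, Nat.zero_add]
        rw [this]
        exact ih hdw p h

-- the central identity: runs of the sorted key list = sorted items of the counter
theorem pv_runs_eq_sorted2_counter_gen (ks s : List Int)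
    (hsp : s.Pairwise (· ≤ ·)) (hperm : s.Perm ks) (hs : PySem.List.sorted ks (fun x => x) = s) :
    PySem.List.sorted2 (PySem.Dict.counter ks).items (fun p => p.1) (fun p => p.2)
      = pvRuns s := by
  -- each run is (k, count of k in ks)
  have hpoint : pvRuns s = ((pvRuns s).map Prod.fst).map (fun k => (k, (ks.count k : Int))) := by
    rw [List.map_map]
    apply (List.map_id (pvRuns s)).symm.trans
    apply List.map_congr_left
    intro p hp
    have := pv_runs_count s hsp p hp
    have hc : s.count p.1 = ks.count p.1 := hperm.count_eq p.1
    cases p with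
    | mk k c =>
        simp only [Function.comp, id]
        simp only at this
        rw [this, hc]
  -- the run heads are a permutation of the distinct elements of ks
  have hpair : (pvRuns s).Pairwise (fun a b => a.1 < b.1) := pv_runs_pairwise s hsp
  have hfstpair : ((pvRuns s).map Prod.fst).Pairwise (· < ·) := List.pairwise_map.2 hpair
  have hnodup : ((pvRuns s).map Prod.fst).Nodup := hfstpair.imp (fun h => ne_of_lt h)
  have hfstperm : ((pvRuns s).map Prod.fst).Perm (PySem.Set.ofList ks) := by
    rw [List.perm_ext_iff_of_nodup hnodup (PySem.Set.nodup_ofList ks)]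
    intro a
    rw [PySem.Set.mem_ofList]
    constructor
    · intro ha
      rcases List.mem_map.1 ha with ⟨p, hp, he⟩
      have := pv_mem_fst_of_mem_runs s p hp
      rw [he] at this
      rw [← hs] at this
      exact (PySem.List.mem_sorted ks (fun x => x) false a).1 this
    · intro ha
      exact pv_mem_runs_fst_of_mem s a (hs ▸ (PySem.List.mem_sorted ks (fun x => x) false a).2 ha)
  have hitems : (PySem.Dict.counter ks).items
      = (PySem.Set.ofList ks).map (fun k => (k, (ks.count k : Int))) :=
    PySem.Dict.items_counter ks
  -- items have pairwise-distinct first components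
  have hinj : ∀ a ∈ (PySem.Dict.counter ks).items, ∀ b ∈ (PySem.Dict.counter ks).items,
      a.1 = b.1 → a = b := by
    intro a ha b hb he
    rw [hitems] at ha hb
    rcases List.mem_map.1 ha with ⟨k, -, hk⟩
    rcases List.mem_map.1 hb with ⟨k', -, hk'⟩
    subst hk; subst hk'
    simp only at he
    simp [he]
  rw [pv_sorted2_eq_sorted_fst _ hinj]
  apply PySem.List.sorted_eq_of_perm_of_pairwise_lt
  · rw [hitems, hpoint]
    exact hfstperm.map _
  · rw [hpoint]
    refine List.pairwise_map.2 ?_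
    simpa using hfstpair

theorem pv_runs_eq_sorted2_counter (ks : List Int) :
    PySem.List.sorted2 (PySem.Dict.counter ks).items (fun p => p.1) (fun p => p.2)
      = pvRuns (PySem.List.sorted ks (fun x => x)) :=
  pv_runs_eq_sorted2_counter_gen ks _
    (by simpa using PySem.List.sorted_pairwise ks (fun x => x))
    (PySem.List.sorted_perm ks (fun x => x) false) rfl

-- ===== VERDICT (by name: the statement is the Claim_ definition above) =====
theorem calculate_length_buckets_spec : Claim_equal_calculate_length_buckets := by
  intro data bucket_size max_bucket _ _
  unfold Spec_calculate_length_buckets calculate_length_buckets calculate_length_buckets_alt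
  simp only [List.map_map]
  rw [← pv_runs_eq_sorted2_counter]
  rw [List.zip_map', List.foldl_map]
  rfl
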